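-- pv_equiv track=rewrite | github.com/Sangioo/Ingegneria-Infomatica | Introduzione-alla-programmazione/Dispense/LabPython04/A_Ex6.py | A_Ex6
-- ===== SOURCE A (Python) =====
-- def A_Ex6(s1, s2):  # somma due numeri in CP2
--     if len(s1) != len(s2):
--         return "ERRORE"
--
--     riporto = 0
--     ris = ""
--     for i in range(-1, -len(s1) - 1, -1):
--         ris += str((int(s1[i]) + int(s2[i])) % 2 + riporto)
--         if (int(s1[i]) + int(s2[i])) > 1:
--             riporto = 1
--         else:
--             riporto = 0
--
--     if ris[-1] != s1[0] and ris[-1] != s2[0]: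
--         return "ERRORE"
--
--     return ris[::-1]
-- ===== SOURCE B (Python) =====
-- def A_Ex6(s1, s2):  # somma due numeri in CP2
--     if len(s1) != len(s2):
--         return "ERRORE"
--
--     pairs = [int(a) + int(b) for a, b in zip(s1, s2)]
--     n = len(pairs)
--     res = "".join(str(pairs[p] % 2 + (1 if p + 1 < n and pairs[p + 1] > 1 else 0))
--                   for p in range(n))
--
--     if res[0] != s1[0] and res[0] != s2[0]:
--         return "ERRORE"
--
--     return res
-- ===== Notes on version B (the rewrite author's own statement) =====
-- stated objective: alternative
-- what changed: B replaces A's right-to-left loop with a sequential carry accumulator by an independent per-position computation (the carry of this adder depends only on the neighbouring pair's own digit sum, never on an incoming carry, so it cannot propagate), building the result left-to-right from a precomputed list of pairwise digit sums.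
import Mathlib
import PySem

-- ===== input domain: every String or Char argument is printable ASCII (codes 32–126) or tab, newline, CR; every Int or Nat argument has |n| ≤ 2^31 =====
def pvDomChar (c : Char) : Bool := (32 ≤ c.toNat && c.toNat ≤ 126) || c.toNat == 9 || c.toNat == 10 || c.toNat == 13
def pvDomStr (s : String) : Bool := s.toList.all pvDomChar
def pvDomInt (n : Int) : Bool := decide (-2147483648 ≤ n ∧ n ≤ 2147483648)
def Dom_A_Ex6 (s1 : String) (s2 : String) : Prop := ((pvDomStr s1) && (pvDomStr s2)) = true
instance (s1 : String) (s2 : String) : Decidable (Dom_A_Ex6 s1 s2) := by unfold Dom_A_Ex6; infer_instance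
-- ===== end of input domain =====

-- B recomputes each output digit independently (this adder's carry never depends on an
-- incoming carry, so it cannot propagate), instead of A's sequential carry accumulator.
-- objective: alternative (same O(n) cost, genuinely different decomposition).

-- int(c) for a one-character string c; Pre_ restricts to digit characters, where it never falls to the default
def pvDigit (c : Char) : Int := (PySem.Int.ofChars? [c]).getD 0

-- ===== PORT A =====
def A_Ex6 (s1 : String) (s2 : String) : String :=
  let l1 := s1.toList
  let l2 := s2.toList
  if l1.length ≠ l2.length then "ERRORE"
  else
    -- state = (riporto, ris); iterate i = -1, -2, …, -len(s1)
    let st := (PySem.List.pyRange (-1) (-(l1.length : Int) - 1) (-1)).foldl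
      (fun (p : Int × List Char) i =>
        (if pvDigit (PySem.List.pyGetD l1 i ' ') + pvDigit (PySem.List.pyGetD l2 i ' ') > 1 then 1 else 0,
         p.2 ++ PySem.Int.toChars
           (PySem.Int.mod (pvDigit (PySem.List.pyGetD l1 i ' ') + pvDigit (PySem.List.pyGetD l2 i ' ')) 2 + p.1)))
      ((0 : Int), ([] : List Char))
    if PySem.List.pyGetD st.2 (-1) ' ' ≠ PySem.List.pyGetD l1 0 ' ' ∧
       PySem.List.pyGetD st.2 (-1) ' ' ≠ PySem.List.pyGetD l2 0 ' ' then "ERRORE"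
    else String.ofList st.2.reverse

-- ===== PORT B =====
def A_Ex6_alt (s1 : String) (s2 : String) : String :=
  let l1 := s1.toList
  let l2 := s2.toList
  if l1.length ≠ l2.length then "ERRORE"
  else
    let pairs := (l1.zip l2).map (fun ab => pvDigit ab.1 + pvDigit ab.2)
    let n := pairs.length
    let res := ((List.range n).map (fun p =>
      PySem.Int.toChars (PySem.Int.mod (pairs.getD p 0) 2 +
        (if p + 1 < n ∧ pairs.getD (p + 1) 0 > 1 then 1 else 0)))).flatten
    if res.getD 0 ' ' ≠ l1.getD 0 ' ' ∧ res.getD 0 ' ' ≠ l2.getD 0 ' ' then "ERRORE"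
    else String.ofList res

-- ===== PRECONDITION & SPEC =====
-- Pre_ excludes only inputs where Python A raises: when the lengths agree A indexes ris[-1]
-- (IndexError on empty strings) and calls int() on every character (ValueError on non-digits).
def Pre_A_Ex6 (s1 : String) (s2 : String) : Prop :=
  s1.toList.length = s2.toList.length →
    (s1.toList ≠ [] ∧ (s1.toList ++ s2.toList).all Char.isDigit = true)
instance (s1 : String) (s2 : String) : Decidable (Pre_A_Ex6 s1 s2) := by unfold Pre_A_Ex6; infer_instance

def pvWitness_A_Ex6 : String × String := ("101", "011")

def Spec_A_Ex6 (s1 : String) (s2 : String) (out : String) : Prop := out = A_Ex6_alt s1 s2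
instance (s1 : String) (s2 : String) (out : String) : Decidable (Spec_A_Ex6 s1 s2 out) := by unfold Spec_A_Ex6; infer_instance

-- ===== CLAIM (what is proved, stated in full; the proofs are below) =====
def Claim_equal_A_Ex6 : Prop := ∀ (s1 : String) (s2 : String), Dom_A_Ex6 s1 s2 → Pre_A_Ex6 s1 s2 → Spec_A_Ex6 s1 s2 (A_Ex6 s1 s2)

-- ===== LEMMAS AND PROOFS =====

-- digit sum of position p
def pvPair (l1 l2 : List Char) (p : Nat) : Int :=
  pvDigit (l1.getD p ' ') + pvDigit (l2.getD p ' ')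

-- the value whose str() B emits at position p (and, as proved below, A too)
def pvVal (l1 l2 : List Char) (n p : Nat) : Int :=
  PySem.Int.mod (pvPair l1 l2 p) 2 +
    (if p + 1 < n ∧ pvPair l1 l2 (p + 1) > 1 then 1 else 0)

lemma pvVal_mem (l1 l2 : List Char) (n p : Nat) :
    pvVal l1 l2 n p = 0 ∨ pvVal l1 l2 n p = 1 ∨ pvVal l1 l2 n p = 2 := by
  have h0 := PySem.Int.mod_nonneg (pvPair l1 l2 p) (b := 2) (by omega)
  have h1 := PySem.Int.mod_lt (pvPair l1 l2 p) (b := 2) (by omega)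
  unfold pvVal
  split <;> omega

lemma toChars_val_singleton (l1 l2 : List Char) (n p : Nat) :
    PySem.Int.toChars (pvVal l1 l2 n p) = [(PySem.Int.toChars (pvVal l1 l2 n p)).getD 0 ' '] := by
  rcases pvVal_mem l1 l2 n p with h | h | h <;> rw [h] <;> decide

lemma flatten_map_single (g : Nat → Char) (L : List Nat) :
    (L.map (fun a => [g a])).flatten = L.map g := by
  induction L with
  | nil => rfl
  | cons a t ih => simp [ih]

lemma head_eq_getD {x y : List Char} (h : x ≠ []) (hxy : x = y) : x.head h = y.getD 0 ' ' := by
  subst hxy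
  cases x with
  | nil => exact absurd rfl h
  | cons a t => rfl

-- A's loop, characterised: after the first m iterations the state is the stated carry and
-- the first m output chunks (positions n-1 … n-m, right to left)
lemma loopA_inv (l1 l2 : List Char) (n m : Nat) (h1 : l1.length = n) (h2 : l2.length = n)
    (hm : m ≤ n) :
    (((List.range m).map (fun (k : Nat) => (-1 : Int) - (k : Int))).foldl
      (fun (p : Int × List Char) i =>
        (if pvDigit (PySem.List.pyGetD l1 i ' ') + pvDigit (PySem.List.pyGetD l2 i ' ') > 1 then 1 else 0,
         p.2 ++ PySem.Int.toChars
           (PySem.Int.mod (pvDigit (PySem.List.pyGetD l1 i ' ') + pvDigit (PySem.List.pyGetD l2 i ' ')) 2 + p.1)))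
      ((0 : Int), ([] : List Char)))
    = ((if m = 0 then 0 else if pvPair l1 l2 (n - m) > 1 then 1 else 0),
       ((List.range m).map (fun k => PySem.Int.toChars (pvVal l1 l2 n (n - 1 - k)))).flatten) := by
  induction m with
  | zero => simp
  | succ m ih =>
    simp only [List.range_succ, List.map_append, List.foldl_append]
    rw [ih (by omega)]
    have he : ((-1 : Int) - (m : Int)) = -(((m + 1 : Nat) : Int)) := by push_cast; ring
    have hg1 : PySem.List.pyGetD l1 ((-1 : Int) - (m : Int)) ' ' = l1.getD (n - 1 - m) ' ' := by
      have hx := PySem.List.pyGetD_neg_natCast l1 (m + 1) ' ' (by omega) (by omega)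
      rw [he]
      exact hx.trans (by rw [List.getD_eq_getElem _ _ (by omega)]; congr 1; omega)
    have hg2 : PySem.List.pyGetD l2 ((-1 : Int) - (m : Int)) ' ' = l2.getD (n - 1 - m) ' ' := by
      have hx := PySem.List.pyGetD_neg_natCast l2 (m + 1) ' ' (by omega) (by omega)
      rw [he]
      exact hx.trans (by rw [List.getD_eq_getElem _ _ (by omega)]; congr 1; omega)
    simp only [List.map_cons, List.map_nil, List.foldl_cons, List.foldl_nil, hg1, hg2,
      List.flatten_append, List.flatten_cons, List.flatten_nil, List.append_nil,
      Prod.mk.injEq]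
    constructor
    · rw [if_neg (Nat.succ_ne_zero m), show n - (m + 1) = n - 1 - m from by omega]
      rfl
    · congr 1
      unfold pvVal
      have hcar : (if m = 0 then (0 : Int) else if pvPair l1 l2 (n - m) > 1 then 1 else 0)
          = (if n - 1 - m + 1 < n ∧ pvPair l1 l2 (n - 1 - m + 1) > 1 then 1 else 0) := by
        rcases Nat.eq_zero_or_pos m with hm0 | hm0
        · subst hm0
          rw [if_pos rfl, if_neg (by intro hc; omega)]
        · have hcond : (n - 1 - m + 1 < n ∧ pvPair l1 l2 (n - 1 - m + 1) > 1)
              ↔ (pvPair l1 l2 (n - m) > 1) := by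
            rw [show n - 1 - m + 1 = n - m from by omega]
            exact and_iff_right (by omega)
          rw [if_neg (show ¬(m = 0) from by omega), if_congr hcond rfl rfl]
      rw [hcar]
      rfl

-- B's pair list evaluates to pvPair at in-range positions
lemma pairs_getD (l1 l2 : List Char) (n p : Nat) (h1 : l1.length = n) (h2 : l2.length = n)
    (hp : p < n) :
    ((l1.zip l2).map (fun ab => pvDigit ab.1 + pvDigit ab.2)).getD p 0 = pvPair l1 l2 p := by
  have hz : p < ((l1.zip l2).map (fun ab => pvDigit ab.1 + pvDigit ab.2)).length := by
    simp [List.length_zip]; omega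
  rw [List.getD_eq_getElem _ _ hz]
  simp only [List.getElem_map, List.getElem_zip]
  unfold pvPair
  rw [List.getD_eq_getElem _ _ (by omega), List.getD_eq_getElem _ _ (by omega)]

-- B's digit-chunk list is pvVal chunk-for-chunk
lemma resB_eq (l1 l2 : List Char) (n : Nat) (h1 : l1.length = n) (h2 : l2.length = n) :
    ((List.range n).map (fun p =>
      PySem.Int.toChars (PySem.Int.mod
        (((l1.zip l2).map (fun ab => pvDigit ab.1 + pvDigit ab.2)).getD p 0) 2 +
        (if p + 1 < n ∧ ((l1.zip l2).map (fun ab => pvDigit ab.1 + pvDigit ab.2)).getD (p + 1) 0 > 1 then 1 else 0))))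
    = (List.range n).map (fun p => PySem.Int.toChars (pvVal l1 l2 n p)) := by
  apply List.map_congr_left
  intro p hp
  rw [List.mem_range] at hp
  rw [pairs_getD l1 l2 n p h1 h2 hp]
  unfold pvVal
  congr 1
  by_cases hlt : p + 1 < n
  · rw [pairs_getD l1 l2 n (p + 1) h1 h2 hlt]
  · rw [if_neg (by tauto), if_neg (by tauto)]

-- flatten of the reversed chunk order is the reverse of the flattened chunks (chunks are singletons)
lemma flatten_rev (l1 l2 : List Char) (n : Nat) :
    (((List.range n).map (fun k => PySem.Int.toChars (pvVal l1 l2 n (n - 1 - k)))).flatten).reverse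
    = ((List.range n).map (fun p => PySem.Int.toChars (pvVal l1 l2 n p))).flatten := by
  have hL : ((List.range n).map (fun k => PySem.Int.toChars (pvVal l1 l2 n (n - 1 - k)))).flatten
      = (List.range n).map (fun k => (PySem.Int.toChars (pvVal l1 l2 n (n - 1 - k))).getD 0 ' ') := by
    rw [show (fun k => PySem.Int.toChars (pvVal l1 l2 n (n - 1 - k)))
        = fun k => [(PySem.Int.toChars (pvVal l1 l2 n (n - 1 - k))).getD 0 ' '] from
        funext fun k => toChars_val_singleton l1 l2 n (n - 1 - k)]
    exact flatten_map_single _ _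
  have hR : ((List.range n).map (fun p => PySem.Int.toChars (pvVal l1 l2 n p))).flatten
      = (List.range n).map (fun p => (PySem.Int.toChars (pvVal l1 l2 n p)).getD 0 ' ') := by
    rw [show (fun p => PySem.Int.toChars (pvVal l1 l2 n p))
        = fun p => [(PySem.Int.toChars (pvVal l1 l2 n p)).getD 0 ' '] from
        funext fun p => toChars_val_singleton l1 l2 n p]
    exact flatten_map_single _ _
  rw [hL, hR, ← List.map_reverse, List.range_eq_range', List.reverse_range', ← List.range_eq_range']
  rw [List.map_map]
  apply List.map_congr_left
  intro a ha
  rw [List.mem_range] at ha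
  simp only [Function.comp]
  rw [show n - 1 - (0 + n - 1 - a) = a from by omega]

lemma flatten_ne_nil (l1 l2 : List Char) (n : Nat) (hn : 0 < n) :
    ((List.range n).map (fun p => PySem.Int.toChars (pvVal l1 l2 n p))).flatten ≠ [] := by
  obtain ⟨m, rfl⟩ : ∃ m, n = m + 1 := ⟨n - 1, by omega⟩
  simp only [List.range_succ, List.map_append, List.flatten_append, List.map_cons, List.map_nil,
    List.flatten_cons, List.flatten_nil, List.append_nil]
  intro h
  rcases List.append_eq_nil_iff.mp h with ⟨-, h2⟩
  rw [toChars_val_singleton l1 l2 (m + 1) m] at h2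
  exact List.cons_ne_nil _ _ h2

-- ===== VERDICT (by name: the statement is the Claim_ definition above) =====
theorem A_Ex6_spec : Claim_equal_A_Ex6 := by
  intro s1 s2 _ hpre
  unfold Spec_A_Ex6 A_Ex6 A_Ex6_alt
  simp only []
  by_cases hlen : s1.toList.length = s2.toList.length
  · rw [if_neg (not_not_intro hlen), if_neg (not_not_intro hlen)]
    obtain ⟨hne, -⟩ := hpre hlen
    have hnpos : 0 < s1.toList.length := List.length_pos_of_ne_nil hne
    have hrange : PySem.List.pyRange (-1) (-(s1.toList.length : Int) - 1) (-1)
        = (List.range s1.toList.length).map (fun (k : Nat) => (-1 : Int) - (k : Int)) := by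
      rw [PySem.List.pyRange_neg_one]
      have he : ((-1 : Int) - (-(s1.toList.length : Int) - 1)).toNat = s1.toList.length := by omega
      rw [he]
    rw [hrange, loopA_inv s1.toList s2.toList s1.toList.length s1.toList.length rfl hlen.symm
      (le_refl _)]
    have hlen_pairs : ((s1.toList.zip s2.toList).map (fun ab => pvDigit ab.1 + pvDigit ab.2)).length
        = s1.toList.length := by
      rw [List.length_map, List.length_zip]
      omega
    rw [hlen_pairs, resB_eq s1.toList s2.toList s1.toList.length rfl hlen.symm]
    have hflat := flatten_rev s1.toList s2.toList s1.toList.length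
    have hrne := flatten_ne_nil s1.toList s2.toList s1.toList.length hnpos
    have hrisne : (((List.range s1.toList.length).map
        (fun k => PySem.Int.toChars (pvVal s1.toList s2.toList s1.toList.length
          (s1.toList.length - 1 - k)))).flatten) ≠ [] := by
      intro h
      apply hrne
      rw [← hflat, h]
      rfl
    have hlast : PySem.List.pyGetD
        (((List.range s1.toList.length).map
          (fun k => PySem.Int.toChars (pvVal s1.toList s2.toList s1.toList.length
            (s1.toList.length - 1 - k)))).flatten) (-1) ' '
        = (((List.range s1.toList.length).map
          (fun p => PySem.Int.toChars (pvVal s1.toList s2.toList s1.toList.length p))).flatten).getD 0 ' ' := by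
      rw [PySem.List.pyGetD_neg_one _ ' ' hrisne, List.getLast_eq_head_reverse hrisne]
      exact head_eq_getD _ hflat
    have hget1 : PySem.List.pyGetD s1.toList 0 ' ' = s1.toList.getD 0 ' ' := by
      rw [show (0 : Int) = ((0 : Nat) : Int) from rfl, PySem.List.pyGetD_natCast]
    have hget2 : PySem.List.pyGetD s2.toList 0 ' ' = s2.toList.getD 0 ' ' := by
      rw [show (0 : Int) = ((0 : Nat) : Int) from rfl, PySem.List.pyGetD_natCast]
    rw [hlast, hget1, hget2]
    split
    · rfl
    · rw [hflat]
  · rw [if_pos hlen, if_pos hlen]
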